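-- pv_equiv track=rewrite | github.com/donniv86/protein-protein-interaction-analysis | event_analysis.py | parseSMILES_str
-- ===== SOURCE A (Python) =====
-- def parseSMILES_str(smiles):
--     length = len(smiles)
--     new_str = ''
--     prev_idx = 0
--     max_length = 66
--     if length <= max_length:
--         return smiles
--     for i in list(range(0, length, max_length))[1:]:
--         new_str += smiles[prev_idx:i + 1] + ' '
--         prev_idx = i + 1
--     if prev_idx < length:
--         new_str += smiles[prev_idx:length]
--     return new_str
-- ===== SOURCE B (Python) =====
-- def parseSMILES_str(smiles):
--     if len(smiles) <= 66:
--         return smiles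
--     out = []
--     for idx, ch in enumerate(smiles):
--         out.append(ch)
--         if idx and idx % 66 == 0:
--             out.append(' ')
--     return ''.join(out)
-- ===== Notes on version B (the rewrite author's own statement) =====
-- stated objective: alternative
-- what changed: B replaces A's slice-accumulating loop over a precomputed stride-66 range list (with a prev_idx cursor and a trailing-remainder append) by a single per-character pass over enumerate(smiles) that emits a space after every positive index divisible by 66, joined at the end.
import Mathlib
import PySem

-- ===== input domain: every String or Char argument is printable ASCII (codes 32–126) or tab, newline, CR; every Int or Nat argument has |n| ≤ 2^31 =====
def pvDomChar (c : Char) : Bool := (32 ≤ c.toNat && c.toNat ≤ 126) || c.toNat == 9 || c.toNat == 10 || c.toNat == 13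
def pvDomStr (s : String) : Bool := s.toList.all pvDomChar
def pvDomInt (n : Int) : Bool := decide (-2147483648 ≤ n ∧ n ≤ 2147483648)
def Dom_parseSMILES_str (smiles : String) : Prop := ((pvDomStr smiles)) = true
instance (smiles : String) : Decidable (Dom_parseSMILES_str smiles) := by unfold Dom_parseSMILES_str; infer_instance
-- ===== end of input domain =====

-- B replaces A's stride-66 slice loop by a single per-character pass that inserts a space
-- after every positive index divisible by 66 (objective: alternative decomposition, same cost).

-- ===== PORT A =====
def parseSMILES_str (smiles : String) : String :=
  let length := PySem.Str.len smiles
  let max_length : Int := 66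
  if length ≤ max_length then smiles
  else
    let st :=
      (PySem.List.slice (PySem.List.pyRange 0 length max_length) (some 1) none).foldl
        (fun (st : String × Int) i =>
          (st.1 ++ PySem.Str.slice smiles (some st.2) (some (i + 1)) ++ " ", i + 1))
        ("", 0)
    if st.2 < length then st.1 ++ PySem.Str.slice smiles (some st.2) (some length) else st.1

-- ===== PORT B =====
def parseSMILES_str_alt (smiles : String) : String :=
  if PySem.Str.len smiles ≤ 66 then smiles
  else
    let out := (PySem.List.enumerate smiles.toList 0).foldl
      (fun (out : List String) (p : Int × Char) =>
        let out' := out ++ [String.ofList [p.2]]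
        if p.1 ≠ 0 ∧ PySem.Int.mod p.1 66 = 0 then out' ++ [" "] else out')
      []
    PySem.Str.join "" out

-- ===== PRECONDITION & SPEC =====
def Spec_parseSMILES_str (smiles : String) (out : String) : Prop := out = parseSMILES_str_alt smiles
instance (smiles : String) (out : String) : Decidable (Spec_parseSMILES_str smiles out) := by unfold Spec_parseSMILES_str; infer_instance

-- ===== CLAIM (what is proved, stated in full; the proofs are below) =====
def Claim_equal_parseSMILES_str : Prop := ∀ (smiles : String), Dom_parseSMILES_str smiles → Spec_parseSMILES_str smiles (parseSMILES_str smiles)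

-- ===== LEMMAS AND PROOFS =====

-- `insCnt cs k`: copy cs, emitting a space after the char reached when the countdown hits 0,
-- then restarting the countdown at 65.  Both programs produce `insCnt cs 66` (for |cs| > 66).
def insCnt : List Char → Nat → List Char
  | [], _ => []
  | c :: rest, 0 => c :: ' ' :: insCnt rest 65
  | c :: rest, k + 1 => c :: insCnt rest k

theorem insCnt_cons_pos (c : Char) (rest : List Char) (m : Nat) (hm : 0 < m) :
    insCnt (c :: rest) m = c :: insCnt rest (m - 1) := by
  cases m with
  | zero => omega
  | succ k => simp [insCnt]

theorem insCnt_chunk : ∀ (cs : List Char) (m : Nat),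
    insCnt cs m =
      if cs.length ≤ m then cs else cs.take (m + 1) ++ ' ' :: insCnt (cs.drop (m + 1)) 65
  | [], m => by simp [insCnt]
  | c :: rest, 0 => by simp [insCnt]
  | c :: rest, m + 1 => by
    have ih := insCnt_chunk rest m
    simp only [insCnt, ih, List.length_cons, List.take_succ_cons, List.drop_succ_cons]
    split_ifs with h1 h2 h2 <;> simp_all <;> omega


-- `insFrom cs i`: per-character insertion as B performs it, starting at index i.
def insFrom : List Char → Nat → List Char
  | [], _ => []
  | c :: rest, i => c :: ((if i ≠ 0 ∧ i % 66 = 0 then [' '] else []) ++ insFrom rest (i + 1))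

theorem insFrom_eq_insCnt : ∀ (cs : List Char) (i : Nat),
    insFrom cs i = insCnt cs (if i = 0 then 66 else 65 - (i - 1) % 66)
  | [], i => by simp [insFrom, insCnt]
  | c :: rest, i => by
    have ih := insFrom_eq_insCnt rest (i + 1)
    by_cases h0 : i = 0
    · subst h0
      simp [insFrom, insCnt, ih]
    · by_cases hm : i % 66 = 0
      · have h65 : (i - 1) % 66 = 65 := by omega
        have h65' : (i + 1 - 1) % 66 = 0 := by omega
        simp [insFrom, insCnt, ih, h0, hm, h65]
      · have hpos : 0 < (if i = 0 then 66 else 65 - (i - 1) % 66) := by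
          simp only [h0, if_false]; omega
        rw [insCnt_cons_pos _ _ _ hpos]
        have harg : (if i + 1 = 0 then 66 else 65 - (i + 1 - 1) % 66)
            = (if i = 0 then 66 else 65 - (i - 1) % 66) - 1 := by
          simp only [h0, if_false, Nat.add_one_ne_zero, Nat.add_sub_cancel]
          omega
        simp only [insFrom, ih, harg, if_neg (by simp [h0, hm] : ¬ (i ≠ 0 ∧ i % 66 = 0)), List.nil_append]

theorem flatten_intersperse_nil : ∀ (l : List (List Char)),
    (List.intersperse ([] : List Char) l).flatten = l.flatten
  | [] => rfl
  | [a] => by simp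
  | a :: b :: t => by
    have h : List.intersperse ([] : List Char) (a :: b :: t)
        = a :: [] :: List.intersperse [] (b :: t) := by simp [List.intersperse]
    rw [h]
    simpa using flatten_intersperse_nil (b :: t)

-- B's fold over `enumerate` computes `insFrom`.
theorem bfold : ∀ (cs : List Char) (i : Nat) (out : List String),
    (((PySem.List.enumerate cs (i : Int)).foldl
      (fun (out : List String) (p : Int × Char) =>
        let out' := out ++ [String.ofList [p.2]]
        if p.1 ≠ 0 ∧ PySem.Int.mod p.1 66 = 0 then out' ++ [" "] else out')
      out).map String.toList).flatten
    = (out.map String.toList).flatten ++ insFrom cs i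
  | [], i, out => by simp [insFrom]
  | c :: rest, i, out => by
    rw [PySem.List.enumerate_cons]
    have hcast : ((i : Int) + 1) = ((i + 1 : Nat) : Int) := by push_cast; ring
    have hcond : ((i : Int) ≠ 0 ∧ PySem.Int.mod (i : Int) 66 = 0) ↔ (i ≠ 0 ∧ i % 66 = 0) := by
      rw [PySem.Int.mod_eq_emod_of_pos (by norm_num)]
      constructor
      · rintro ⟨h1, h2⟩; exact ⟨by exact_mod_cast h1, by omega⟩
      · rintro ⟨h1, h2⟩; exact ⟨by exact_mod_cast h1, by omega⟩
    simp only [List.foldl_cons, hcast]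
    by_cases h : i ≠ 0 ∧ i % 66 = 0
    · rw [if_pos (hcond.mpr h)]
      rw [bfold rest (i + 1)]
      simp [insFrom, h.1, h.2]
    · rw [if_neg (fun hc => h (hcond.mp hc))]
      rw [bfold rest (i + 1)]
      have h' : ¬ (i ≠ 0 ∧ i % 66 = 0) := h
      simp only [insFrom, if_neg h']
      simp

-- A's fold over the tail of the stride-66 range list, from cursor 66*j+1, finishes as `insCnt … 65`.
theorem afold (smiles : String) : ∀ (b j : Nat) (acc : String),
    1 ≤ j → 66 * j + 1 ≤ smiles.toList.length →
    smiles.toList.length ≤ 66 * (j + b) + 66 → 66 * (j + b) < smiles.toList.length →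
    (let st := ((List.range' (j + 1) b).map (fun k => ((66 * k : Nat) : Int))).foldl
        (fun (st : String × Int) i =>
          (st.1 ++ PySem.Str.slice smiles (some st.2) (some (i + 1)) ++ " ", i + 1))
        (acc, ((66 * j + 1 : Nat) : Int))
     (if st.2 < (smiles.toList.length : Int) then
        st.1 ++ PySem.Str.slice smiles (some st.2) (some (smiles.toList.length : Int))
      else st.1).toList)
    = acc.toList ++ insCnt (smiles.toList.drop (66 * j + 1)) 65 := by
  intro b
  induction b with
  | zero =>
    intro j acc hj h1 h2 h3
    simp only [List.range'_zero, List.map_nil, List.foldl_nil]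
    by_cases hlt : 66 * j + 1 < smiles.toList.length
    · rw [if_pos (by exact_mod_cast hlt)]
      rw [String.toList_append, PySem.Str.toList_slice, PySem.Chars.slice_eq_listSlice,
        PySem.List.slice_natCast]
      have hlen : (smiles.toList.drop (66 * j + 1)).length = smiles.toList.length - (66 * j + 1) :=
        List.length_drop ..
      rw [List.take_of_length_le hlen.le]
      rw [insCnt_chunk]
      rw [if_pos (by rw [hlen]; omega)]
    · have heq : smiles.toList.length = 66 * j + 1 := by omega
      have hnil : smiles.toList.drop (66 * j + 1) = [] := by
        rw [← heq]; exact List.drop_length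
      rw [if_neg (by exact_mod_cast (by omega : ¬ (66 * j + 1 < smiles.toList.length)))]
      simp [hnil, insCnt]
  | succ b ih =>
    intro j acc hj h1 h2 h3
    rw [List.range'_succ, List.map_cons, List.foldl_cons]
    have hstep2 : ((66 * (j + 1) : Nat) : Int) + 1 = ((66 * (j + 1) + 1 : Nat) : Int) := by
      push_cast; ring
    simp only [hstep2]
    have iha := ih (j + 1)
      (acc ++ PySem.Str.slice smiles (some ((66 * j + 1 : Nat) : Int))
        (some ((66 * (j + 1) + 1 : Nat) : Int)) ++ " ")
      (by omega) (by omega) (by omega) (by omega)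
    simp only [] at iha ⊢
    rw [show j + 1 + 1 = j + 2 from rfl] at iha
    rw [iha]
    rw [String.toList_append, String.toList_append, PySem.Str.toList_slice,
      PySem.Chars.slice_eq_listSlice, PySem.List.slice_natCast]
    have hd : smiles.toList.drop (66 * (j + 1) + 1) = (smiles.toList.drop (66 * j + 1)).drop 66 := by
      rw [List.drop_drop]; congr 1
    have htake : 66 * (j + 1) + 1 - (66 * j + 1) = 66 := by omega
    rw [htake, hd]
    have hdlen : 66 ≤ (smiles.toList.drop (66 * j + 1)).length := by
      rw [List.length_drop]; omega
    conv_rhs => rw [insCnt_chunk, if_neg (by omega)]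
    simp

-- ===== VERDICT (by name: the statement is the Claim_ definition above) =====
theorem parseSMILES_str_spec : Claim_equal_parseSMILES_str := by
  intro smiles _
  unfold Spec_parseSMILES_str parseSMILES_str parseSMILES_str_alt
  simp only [PySem.Str.len_eq]
  by_cases hle : (smiles.toList.length : Int) ≤ 66
  · rw [if_pos hle, if_pos hle]
  · rw [if_neg hle, if_neg hle]
    have hn : 66 < smiles.toList.length := by exact_mod_cast not_le.mp hle
    apply String.toList_inj.mp
    -- B side
    have hb := bfold smiles.toList 0 []
    simp only [Nat.cast_zero] at hb
    have hjoin : ∀ (out : List String),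
        (PySem.Str.join "" out).toList = (out.map String.toList).flatten := by
      intro out
      rw [PySem.Str.toList_join]
      show PySem.Chars.join "".toList _ = _
      simp only [PySem.Chars.join]
      have : "".toList = ([] : List Char) := rfl
      rw [this, List.intercalate, flatten_intersperse_nil]
    rw [hjoin, hb]
    simp only [List.map_nil, List.flatten_nil, List.nil_append]
    rw [insFrom_eq_insCnt]
    simp only [reduceIte]
    -- A side
    set n := smiles.toList.length with hne
    have hq0 : (0 : Int) < (n : Int) := by exact_mod_cast (by omega : 0 < n)
    rw [PySem.List.pyRange_of_pos _ _ (by norm_num : (0:Int) < 66)]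
    rw [if_pos hq0]
    set q : Nat := (n + 65) / 66 with hqdef
    have hq : (((n : Int) - 0 + 66 - 1) / 66).toNat = q := by omega
    rw [hq]
    have hq2 : 2 ≤ q := by omega
    rw [PySem.List.slice_from _ (show (0:Int) ≤ 1 by norm_num), Int.toNat_one]
    have hmapf : (List.range q).map (fun k : Nat => (0 : Int) + 66 * (k : Int))
        = (List.range q).map (fun k => ((66 * k : Nat) : Int)) := by
      apply List.map_congr_left; intro k _; push_cast; ring
    rw [hmapf]
    rw [List.range_eq_range']
    have hsplit : List.range' 0 q = 0 :: List.range' 1 (q - 1) := by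
      have hq1 : q = (q - 1) + 1 := by omega
      conv_lhs => rw [hq1, List.range'_succ]
    rw [hsplit]
    simp only [List.map_cons, List.drop_succ_cons, List.drop_zero]
    have hsplit2 : List.range' 1 (q - 1) = 1 :: List.range' 2 (q - 2) := by
      have hq1 : q - 1 = (q - 2) + 1 := by omega
      conv_lhs => rw [hq1, List.range'_succ]
    rw [hsplit2, List.map_cons, List.foldl_cons]
    have hc66 : ((66 * 1 : Nat) : Int) + 1 = ((66 * 1 + 1 : Nat) : Int) := by push_cast
    simp only [hc66]
    have ha := afold smiles (q - 2) 1
      ("" ++ PySem.Str.slice smiles (some 0) (some ((66 * 1 + 1 : Nat) : Int)) ++ " ")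
      (by omega) (by omega) (by omega) (by omega)
    simp only [] at ha
    rw [show (1:Nat) + 1 = 2 from rfl] at ha
    rw [ha]
    rw [String.toList_append, String.toList_append, PySem.Str.toList_slice,
      PySem.Chars.slice_eq_listSlice]
    have hsl : PySem.List.slice smiles.toList (some 0) (some ((66 * 1 + 1 : Nat) : Int))
        = smiles.toList.take 67 := by
      rw [show ((0:Int)) = ((0 : Nat) : Int) from rfl, PySem.List.slice_natCast]
      simp
    rw [hsl]
    conv_rhs => rw [insCnt_chunk, if_neg (by omega)]
    simp
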